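-- pv_equiv track=rewrite | github.com/Marshalljordanmd/Y-simulations | y_sim_variable_lineages.py | growth
-- ===== SOURCE A (Python) =====
-- def growth(rate,world):
-- 	#rate is the population growth rate, the number of males born per man in the population per generation
-- 	#world is a dictionary of lists, representing the world of men (keys) with their Y mutations numbered in a list (values).
--
-- 	j=1
-- 	new_pop = {} #the next generation
-- 	for key in world:    #new men are added and consecutively numbered to make up the next generation. key = man in world
-- 		for i in range(j,rate+j):
-- 			new_pop[i] = world[key] #for each new male, his fathers mutations are assigned
-- 		j += rate
--
-- 	return new_pop  ##the next generation replaces the old, who dies. So 'world' is replaced with 'new_pop' which is larger by the rate of growth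
-- ===== SOURCE B (Python) =====
-- def growth(rate, world):
--     # Flat single pass: father index derived by integer division instead of
--     # nested loops with a running offset.  Same list objects are assigned.
--     fathers = list(world.values())
--     return {i + 1: fathers[i // rate] for i in range(len(fathers) * rate)}
-- ===== Notes on version B (the rewrite author's own statement) =====
-- stated objective: simpler
-- what changed: replaced the nested loops with a running key offset by one flat dict comprehension over range(len(world)*rate) whose father index is i//rate
import Mathlib
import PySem

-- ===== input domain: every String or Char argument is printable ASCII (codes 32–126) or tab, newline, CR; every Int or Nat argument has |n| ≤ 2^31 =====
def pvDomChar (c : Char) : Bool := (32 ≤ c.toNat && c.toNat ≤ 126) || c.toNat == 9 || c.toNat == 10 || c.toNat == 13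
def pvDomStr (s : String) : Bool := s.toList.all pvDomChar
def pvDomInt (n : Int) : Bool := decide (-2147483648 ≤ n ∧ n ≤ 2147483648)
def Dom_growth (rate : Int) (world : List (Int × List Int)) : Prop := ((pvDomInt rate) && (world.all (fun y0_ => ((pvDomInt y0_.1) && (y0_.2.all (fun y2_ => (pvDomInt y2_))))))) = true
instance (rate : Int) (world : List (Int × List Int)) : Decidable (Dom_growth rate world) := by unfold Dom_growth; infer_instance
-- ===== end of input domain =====

-- B replaces A's nested loops (running key offset j) by one flat pass whose
-- father index is derived by integer division; objective: simpler.

-- ===== PORT A =====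
-- 'for key in world' iterates the dict's pairs; under Pre_growth (unique keys)
-- 'world[key]' is exactly the iterated pair's value kv.2.
def growth (rate : Int) (world : List (Int × List Int)) : List (Int × List Int) :=
  let st := world.foldl
    (fun (st : PySem.Dict Int (List Int) × Int) kv =>
      ((PySem.List.pyRange st.2 (rate + st.2) 1).foldl
          (fun d i => d.insert i kv.2) st.1,
       st.2 + rate))
    (PySem.Dict.empty, 1)
  st.1.items

-- ===== PORT B =====
-- fathers[i // rate]: the index is always in range when the range is nonempty,
-- so the default [] of pyGetD is never returned.
def growth_alt (rate : Int) (world : List (Int × List Int)) : List (Int × List Int) :=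
  let fathers := world.map Prod.snd
  (PySem.List.pyRange 0 ((fathers.length : Int) * rate) 1).map
    (fun i => (i + 1, PySem.List.pyGetD fathers (PySem.Int.floordiv i rate) []))

-- ===== PRECONDITION & SPEC =====
-- Pre_growth excludes association lists with duplicate keys: they do not
-- correspond to any Python dict (dict literals collapse duplicate keys).
def Pre_growth (rate : Int) (world : List (Int × List Int)) : Prop :=
  (world.map Prod.fst).Nodup
instance (rate : Int) (world : List (Int × List Int)) : Decidable (Pre_growth rate world) := by unfold Pre_growth; infer_instance

def pvWitness_growth : Int × (List (Int × List Int)) := (2, [(1, [3]), (2, [])])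

def Spec_growth (rate : Int) (world : List (Int × List Int)) (out : List (Int × List Int)) : Prop := out = growth_alt rate world
instance (rate : Int) (world : List (Int × List Int)) (out : List (Int × List Int)) : Decidable (Spec_growth rate world out) := by unfold Spec_growth; infer_instance

-- ===== CLAIM (what is proved, stated in full; the proofs are below) =====
def Claim_equal_growth : Prop := ∀ (rate : Int) (world : List (Int × List Int)), Dom_growth rate world → Pre_growth rate world → Spec_growth rate world (growth rate world)

-- ===== LEMMAS AND PROOFS =====

-- the common "block" shape: for each father v, one block of rate consecutive keys
def blocks (rate : Int) : List (List Int) → Int → List (Int × List Int)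
  | [], _ => []
  | v :: t, j => (PySem.List.pyRange j (rate + j) 1).map (fun i => (i, v)) ++ blocks rate t (j + rate)

theorem floordiv_rate_shift (rate k : Int) (hr : 0 < rate) (_hk : 0 ≤ k) :
    PySem.Int.floordiv (rate + k) rate = 1 + PySem.Int.floordiv k rate := by
  have hb : PySem.Int.floordiv k rate * rate ≤ k ∧ k < (PySem.Int.floordiv k rate + 1) * rate :=
    (PySem.Int.floordiv_eq_iff_of_pos hr).mp rfl
  rw [PySem.Int.floordiv_eq_iff_of_pos hr]
  constructor <;> nlinarith [hb.1, hb.2]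

theorem floordiv_nonneg_of_pos (rate k : Int) (hr : 0 < rate) (hk : 0 ≤ k) :
    0 ≤ PySem.Int.floordiv k rate := by
  rw [PySem.Int.le_floordiv_iff_mul_le hr]; nlinarith

-- A's loop, from any state whose keys all lie below j, appends the blocks
theorem growth_loop (rate : Int) (hr : 0 < rate) :
    ∀ (w : List (Int × List Int)) (d : PySem.Dict Int (List Int)) (j : Int),
      (∀ p ∈ d.items, p.1 < j) →
      (w.foldl
        (fun (st : PySem.Dict Int (List Int) × Int) kv =>
          ((PySem.List.pyRange st.2 (rate + st.2) 1).foldl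
              (fun d i => d.insert i kv.2) st.1,
           st.2 + rate))
        (d, j)).1.items = d.items ++ blocks rate (w.map Prod.snd) j := by
  intro w
  induction w with
  | nil => intro d j _; simp [blocks]
  | cons kv t ih =>
      intro d j hlt
      have hfresh : ∀ a ∈ PySem.List.pyRange j (rate + j) 1, d.contains a = false := by
        intro a ha
        rw [PySem.List.mem_pyRange_one] at ha
        have hnk : a ∉ d.keys := by
          intro hmem
          simp only [PySem.Dict.keys] at hmem
          obtain ⟨p, hp, hpa⟩ := List.mem_map.mp hmem
          have := hlt p hp; omega
        rw [PySem.Dict.contains_eq_decide_mem_keys]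
        simpa using hnk
      have hnd : ((PySem.List.pyRange j (rate + j) 1).map (fun a => a)).Nodup := by
        simpa using PySem.List.nodup_pyRange_one j (rate + j)
      have happ := PySem.Dict.items_foldl_insert_fresh
        (l := PySem.List.pyRange j (rate + j) 1) (k := fun a => a) (v := fun _ => kv.2)
        (d := d) hfresh hnd
      simp only [List.foldl_cons]
      rw [ih _ (j + rate) ?_]
      · simp only [happ, blocks, List.map_cons]
        rw [List.append_assoc]
      · intro p hp
        rw [happ] at hp
        rcases List.mem_append.mp hp with h | h
        · have := hlt p h; omega
        · obtain ⟨a, ha, hpa⟩ := List.mem_map.mp h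
          rw [PySem.List.mem_pyRange_one] at ha
          subst hpa; simpa using by omega

-- B's flat map, generalized over the starting key, equals the block list
theorem alt_blocks (rate : Int) (hr : 0 < rate) :
    ∀ (fs : List (List Int)) (j : Int),
      (PySem.List.pyRange 0 ((fs.length : Int) * rate) 1).map
        (fun i => (j + i, PySem.List.pyGetD fs (PySem.Int.floordiv i rate) [])) =
      blocks rate fs j := by
  intro fs
  induction fs with
  | nil => intro j; simp [blocks]
  | cons v t ih =>
      intro j
      have ht0 : (0 : Int) ≤ (t.length : Int) := Int.natCast_nonneg _
      have hsplit := PySem.List.pyRange_one_append 0 rate (((v :: t).length : Int) * rate)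
        (by omega) (by simp only [List.length_cons]; push_cast; nlinarith)
      rw [hsplit, List.map_append]
      have h1 : (PySem.List.pyRange 0 rate 1).map
          (fun i => (j + i, PySem.List.pyGetD (v :: t) (PySem.Int.floordiv i rate) [])) =
          (PySem.List.pyRange j (rate + j) 1).map (fun i => (i, v)) := by
        rw [PySem.List.pyRange_one 0 rate, PySem.List.pyRange_one j (rate + j)]
        have hrn : rate + j - j = rate - 0 := by ring
        rw [hrn]
        simp only [List.map_map]
        apply List.map_congr_left
        intro k hk
        rw [List.mem_range] at hk
        have hkr : (k : Int) < rate := by omega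
        have h0 : PySem.Int.floordiv ((k : Int)) rate = 0 := by
          rw [PySem.Int.floordiv_eq_iff_of_pos hr]
          constructor <;> nlinarith
        simp only [Function.comp_apply, zero_add, h0, Prod.mk.injEq]
        simp [PySem.List.pyGetD_zero]
      have h2 : (PySem.List.pyRange rate (((v :: t).length : Int) * rate) 1).map
          (fun i => (j + i, PySem.List.pyGetD (v :: t) (PySem.Int.floordiv i rate) [])) =
          blocks rate t (j + rate) := by
        rw [← ih (j + rate)]
        rw [PySem.List.pyRange_one rate, PySem.List.pyRange_one 0]
        have hlen : (((v :: t).length : Int) * rate) - rate = ((t.length : Int) * rate) - 0 := by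
          simp only [List.length_cons]; push_cast; ring
        rw [hlen]
        simp only [List.map_map]
        apply List.map_congr_left
        intro k hk
        rw [List.mem_range] at hk
        have hfd : PySem.Int.floordiv (rate + k) rate = 1 + PySem.Int.floordiv k rate :=
          floordiv_rate_shift rate k hr (by positivity)
        have hnn : 0 ≤ PySem.Int.floordiv ((0 : Int) + k) rate :=
          floordiv_nonneg_of_pos rate _ hr (by positivity)
        simp only [Function.comp_apply, zero_add] at hnn ⊢
        rcases Int.le.dest hnn with ⟨m, hm⟩
        simp only [zero_add] at hm
        simp only [hfd, Prod.mk.injEq]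
        refine ⟨by ring, ?_⟩
        rw [show (1 : Int) + PySem.Int.floordiv (k : Int) rate = ((m + 1 : Nat) : Int) by
              push_cast; omega,
            show PySem.Int.floordiv (k : Int) rate = ((m : Nat) : Int) by omega]
        rw [PySem.List.pyGetD_natCast, PySem.List.pyGetD_natCast]
        simp
      rw [h1, h2]; rfl

-- ===== VERDICT (by name: the statement is the Claim_ definition above) =====
theorem growth_loop_nonpos (rate : Int) (h : rate ≤ 0) :
    ∀ (w : List (Int × List Int)) (d : PySem.Dict Int (List Int)) (j : Int),
      (w.foldl
        (fun (st : PySem.Dict Int (List Int) × Int) kv =>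
          ((PySem.List.pyRange st.2 (rate + st.2) 1).foldl
              (fun d i => d.insert i kv.2) st.1,
           st.2 + rate))
        (d, j)).1 = d := by
  intro w
  induction w with
  | nil => intro d j; rfl
  | cons kv t ih =>
      intro d j
      simp only [List.foldl_cons]
      rw [PySem.List.pyRange_one_eq_nil (by omega : rate + j ≤ j)]
      simpa using ih d (j + rate)

theorem growth_spec : Claim_equal_growth := by
  intro rate world _ _
  simp only [Spec_growth, growth, growth_alt]
  by_cases hr : rate ≤ 0
  · have hnil : ((world.map Prod.snd).length : Int) * rate ≤ 0 := by
      have : (0 : Int) ≤ ((world.map Prod.snd).length : Int) := Int.natCast_nonneg _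
      nlinarith
    rw [PySem.List.pyRange_one_eq_nil hnil]
    rw [growth_loop_nonpos rate hr world PySem.Dict.empty 1]
    simp [PySem.Dict.empty]
  · rw [growth_loop rate (by omega) world PySem.Dict.empty 1 (by simp [PySem.Dict.empty])]
    rw [← alt_blocks rate (by omega) (world.map Prod.snd) 1]
    simp only [PySem.Dict.empty, List.nil_append]
    apply List.map_congr_left
    intro i _
    simp [add_comm]
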